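-- pv_equiv track=rewrite | github.com/dejbug/sc-springer-bk | src/tools/.old/tabellensorter.py | groupSequence
-- ===== SOURCE A (Python) =====
-- def groupSequence(seq):
-- 	seq = tuple(seq)
-- 	gg = []
-- 	g = 0
-- 	for i in range(len(seq)):
-- 		hasPrev = i >= 1
-- 		hasNext = i < len(seq) - 1
-- 		likePrev = hasPrev and seq[i] == seq[i - 1]
-- 		likeNext = hasNext and seq[i] == seq[i + 1]
-- 		inGroup = likePrev or likeNext
-- 		lastOfGroup = likePrev and not likeNext
-- 		if inGroup: g += 1
-- 		gg.append(g)
-- 		if lastOfGroup: g = 0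
-- 	return gg
-- ===== SOURCE B (Python) =====
-- import itertools
--
-- def groupSequence(seq):
-- 	out = []
-- 	for _, grp in itertools.groupby(seq):
-- 		n = sum(1 for _ in grp)
-- 		if n == 1:
-- 			out.append(0)
-- 		else:
-- 			out.extend(range(1, n + 1))
-- 	return out
-- ===== Notes on version B (the rewrite author's own statement) =====
-- stated objective: simpler
-- what changed: Replaces A's per-index likePrev/likeNext/counter-reset bookkeeping with run-length grouping via itertools.groupby: a singleton run contributes 0, a run of length L contributes 1..L.
import Mathlib
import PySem

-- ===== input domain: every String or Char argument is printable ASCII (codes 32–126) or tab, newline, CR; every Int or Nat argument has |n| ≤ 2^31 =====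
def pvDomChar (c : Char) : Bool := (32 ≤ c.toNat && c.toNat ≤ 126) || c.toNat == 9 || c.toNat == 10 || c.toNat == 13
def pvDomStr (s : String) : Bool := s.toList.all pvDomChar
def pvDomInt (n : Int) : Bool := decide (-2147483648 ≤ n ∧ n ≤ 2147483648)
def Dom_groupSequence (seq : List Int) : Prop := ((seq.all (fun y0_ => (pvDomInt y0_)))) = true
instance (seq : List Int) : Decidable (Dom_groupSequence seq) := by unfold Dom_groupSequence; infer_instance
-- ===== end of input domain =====

-- B replaces A's per-index likePrev/likeNext/reset counter logic with run-length grouping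
-- (itertools.groupby): a singleton run contributes 0, a run of length L contributes 1..L.

-- ===== PORT A =====
-- loop body of A's for-loop; the state is (g, gg)
def gsStep (s : List Int) (st : Int × List Int) (i : Int) : Int × List Int :=
  let g := st.1
  let gg := st.2
  let likePrev := decide (i ≥ 1) && (PySem.List.pyGet? s (i - 1) == PySem.List.pyGet? s i)
  let likeNext := decide (i < (s.length : Int) - 1) && (PySem.List.pyGet? s i == PySem.List.pyGet? s (i + 1))
  let inGroup := likePrev || likeNext
  let lastOfGroup := likePrev && !likeNext
  let g1 := if inGroup then g + 1 else g
  let gg1 := gg ++ [g1]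
  (if lastOfGroup then 0 else g1, gg1)

def groupSequence (seq : List Int) : List Int :=
  ((PySem.List.pyRange 0 (seq.length : Int) 1).foldl (gsStep seq) (0, [])).2

-- ===== PORT B =====
-- port of itertools.groupby with the default key: split into maximal runs of equal elements
def gsGroups : List Int → List (List Int)
  | [] => []
  | x :: t =>
      (x :: t.takeWhile (· == x)) :: gsGroups (t.dropWhile (· == x))
termination_by l => l.length
decreasing_by
  simp only [List.length_cons]
  exact Nat.lt_succ_of_le (List.length_dropWhile_le _ _)

def groupSequence_alt (seq : List Int) : List Int :=
  (gsGroups seq).foldl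
    (fun out grp =>
      let n : Int := grp.length
      if n == 1 then out ++ [0] else out ++ PySem.List.pyRange 1 (n + 1) 1)
    []

-- ===== PRECONDITION & SPEC =====
def Spec_groupSequence (seq : List Int) (out : List Int) : Prop := out = groupSequence_alt seq
instance (seq : List Int) (out : List Int) : Decidable (Spec_groupSequence seq out) := by unfold Spec_groupSequence; infer_instance

-- ===== CLAIM (what is proved, stated in full; the proofs are below) =====
def Claim_equal_groupSequence : Prop := ∀ (seq : List Int), Dom_groupSequence seq → Spec_groupSequence seq (groupSequence seq)

-- ===== LEMMAS AND PROOFS =====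

-- per-group contribution of B
def gsRun (grp : List Int) : List Int :=
  if ((grp.length : Int)) == 1 then [0] else PySem.List.pyRange 1 ((grp.length : Int) + 1) 1

theorem alt_eq_flatMap (seq : List Int) :
    groupSequence_alt seq = (gsGroups seq).flatMap gsRun := by
  unfold groupSequence_alt
  have hbody : (fun (out : List Int) (grp : List Int) =>
      let n : Int := grp.length
      if n == 1 then out ++ [0] else out ++ PySem.List.pyRange 1 (n + 1) 1)
      = fun out grp => out ++ gsRun grp := by
    funext out grp
    simp only [gsRun]
    split <;> rfl
  rw [hbody, PySem.List.foldl_append_eq_flatMap]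
  rfl

-- the accumulated output list factors out of A's fold
theorem foldl_gsStep_append (s : List Int) :
    ∀ (l : List Int) (g : Int) (gg : List Int),
      l.foldl (gsStep s) (g, gg)
        = ((l.foldl (gsStep s) (g, [])).1, gg ++ (l.foldl (gsStep s) (g, [])).2) := by
  intro l
  induction l with
  | nil => intro g gg; simp
  | cons a t ih =>
      intro g gg
      simp only [List.foldl_cons]
      have hstep : gsStep s (g, gg) a
          = ((gsStep s (g, []) a).1, gg ++ (gsStep s (g, []) a).2) := by
        simp [gsStep]
      rw [hstep]
      obtain ⟨g', e⟩ := gsStep s (g, []) a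
      rw [ih g' (gg ++ e), ih g' e]
      simp

-- A's loop from index i with current counter g and empty accumulator
def aLoop (s : List Int) (i : Nat) (g : Int) : List Int :=
  ((PySem.List.pyRange (i : Int) (s.length : Int) 1).foldl (gsStep s) (g, [])).2

theorem aLoop_end (s : List Int) (g : Int) : aLoop s s.length g = [] := by
  simp [aLoop, PySem.List.pyRange_one_eq_nil le_rfl]

theorem aLoop_step (s : List Int) (i : Nat) (g : Int) (hi : i < s.length) :
    aLoop s i g
      = (gsStep s (g, []) (i : Int)).2 ++ aLoop s (i + 1) (gsStep s (g, []) (i : Int)).1 := by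
  unfold aLoop
  rw [PySem.List.pyRange_one_cons (by exact_mod_cast hi)]
  simp only [List.foldl_cons]
  obtain ⟨g', e⟩ := gsStep s (g, []) (i : Int)
  rw [foldl_gsStep_append s _ g' e]
  push_cast
  rfl

-- evaluating A's loop body at a natural index, given the two adjacency bits
theorem gsStep_eval (s : List Int) (i : Nat) (g : Int) (lp ln : Bool)
    (hp : (decide (1 ≤ i) && (s[i - 1]? == s[i]?)) = lp)
    (hn : (decide (i + 1 < s.length) && (s[i]? == s[i + 1]?)) = ln) :
    gsStep s (g, []) (i : Int)
      = (if lp && !ln then 0 else if lp || ln then g + 1 else g,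
         [if lp || ln then g + 1 else g]) := by
  simp only [gsStep]
  have hcast1 : ((i : Int) + 1) = ((i + 1 : Nat) : Int) := by push_cast; ring
  have hgn : decide ((i : Int) < (s.length : Int) - 1) = decide (i + 1 < s.length) := by
    simp only [decide_eq_decide]; omega
  by_cases h1 : 1 ≤ i
  · have hcast0 : ((i : Int) - 1) = ((i - 1 : Nat) : Int) := by omega
    have hgp : decide ((i : Int) ≥ 1) = decide (1 ≤ i) := by
      simp only [decide_eq_decide]; omega
    rw [hcast0, hcast1, hgp, hgn]
    simp only [PySem.List.pyGet?_natCast]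
    rw [hp, hn]
    simp
  · have hi0 : i = 0 := by omega
    subst hi0
    have hgp : decide ((0 : Int) ≥ 1) = false := by decide
    have hgp' : decide (1 ≤ 0) = false := by decide
    rw [hgp' ] at hp
    simp only [Bool.false_and] at hp
    rw [Nat.cast_zero] at hcast1 hgn ⊢
    rw [hcast1, hgn, hgp]
    simp only [Bool.false_and, PySem.List.pyGet?_natCast, PySem.List.pyGet?_zero]
    rw [hn, ← hp]
    simp

-- takeWhile / dropWhile facts
theorem tw_get (x : Int) : ∀ (t : List Int) (j : Nat),
    j < (t.takeWhile (· == x)).length → t[j]? = some x := by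
  intro t
  induction t with
  | nil => intro j h; simp at h
  | cons a t ih =>
      intro j h
      by_cases hax : a = x
      · subst hax
        simp only [List.takeWhile_cons, beq_self_eq_true, if_true, List.length_cons] at h
        cases j with
        | zero => simp
        | succ j' =>
            simp only [Nat.succ_lt_succ_iff] at h
            simpa using ih j' h
      · simp [hax] at h

theorem tw_end (x : Int) : ∀ (t : List Int),
    t[(t.takeWhile (· == x)).length]? ≠ some x := by
  intro t
  induction t with
  | nil => simp
  | cons a t ih =>
      by_cases hax : a = x
      · subst hax
        simp only [List.takeWhile_cons, beq_self_eq_true, if_true, List.length_cons]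
        simpa using ih
      · simp only [List.takeWhile_cons, beq_iff_eq, hax, if_false, List.length_nil,
          List.getElem?_cons_zero]
        exact fun h => hax (Option.some.inj h)

theorem dw_eq_drop (x : Int) : ∀ (t : List Int),
    t.dropWhile (· == x) = t.drop (t.takeWhile (· == x)).length := by
  intro t
  induction t with
  | nil => simp
  | cons a t ih =>
      by_cases hax : a = x
      · subst hax
        simpa [List.takeWhile_cons, List.dropWhile_cons] using ih
      · simp [List.takeWhile_cons, List.dropWhile_cons, hax]

-- the loop across the rest of a run: positions i..i+k are in the run that started before i
theorem run_lemma (s : List Int) : ∀ (k i : Nat) (g : Int), i < s.length →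
    1 ≤ i → s[i - 1]? = s[i]? →
    (∀ j : Nat, j ≤ k → s[i + j]? = s[i]?) →
    s[i + k]? ≠ s[i + k + 1]? →
    aLoop s i g = PySem.List.pyRange (g + 1) (g + (k : Int) + 2) 1 ++ aLoop s (i + k + 1) 0 := by
  intro k
  induction k with
  | zero =>
      intro i g hi hi1 hp _ h2
      simp only [Nat.add_zero] at h2
      have hlp : (decide (1 ≤ i) && (s[i - 1]? == s[i]?)) = true := by
        simp [hi1, hp]
      have hln : (decide (i + 1 < s.length) && (s[i]? == s[i + 1]?)) = false := by
        have : (s[i]? == s[i + 1]?) = false := beq_eq_false_iff_ne.mpr h2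
        simp [this]
      rw [aLoop_step s i g hi, gsStep_eval s i g true false hlp hln]
      simp only [Bool.not_false, Bool.and_self, if_true, Bool.true_or, Nat.cast_zero,
        Nat.add_zero]
      have hr : g + 0 + 2 = (g + 1) + 1 := by ring
      rw [hr, PySem.List.pyRange_one_singleton]
  | succ k ih =>
      intro i g hi hi1 hp h1 h2
      have hsome : s[i]? = some s[i] := List.getElem?_eq_getElem hi
      have hnext : s[i + 1]? = s[i]? := h1 1 (by omega)
      have hin1 : i + 1 < s.length := by
        by_contra hcon
        have hnone : s[i + 1]? = none := List.getElem?_eq_none (by omega)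
        rw [hnone, hsome] at hnext
        simp at hnext
      have hlp : (decide (1 ≤ i) && (s[i - 1]? == s[i]?)) = true := by
        simp [hi1, hp]
      have hln : (decide (i + 1 < s.length) && (s[i]? == s[i + 1]?)) = true := by
        rw [hnext]
        simp [hin1]
      rw [aLoop_step s i g hi, gsStep_eval s i g true true hlp hln]
      simp only [Bool.and_true, Bool.and_false, Bool.false_and, Bool.true_and, Bool.and_self, Bool.not_true, Bool.not_false, Bool.true_or, Bool.false_or, Bool.or_self, Bool.false_eq_true, if_true, if_false]
      have hih := ih (i + 1) (g + 1) hin1 (by omega)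
        (by simpa using hnext.symm)
        (by
          intro j hj
          have e1 : i + 1 + j = i + (j + 1) := by omega
          rw [e1, h1 (j + 1) (by omega)]
          exact hnext.symm)
        (by
          have e1 : i + 1 + k = i + (k + 1) := by omega
          rw [e1]
          exact h2)
      rw [hih]
      have hidx : i + 1 + k + 1 = i + (k + 1) + 1 := by omega
      rw [hidx]
      have hrange : PySem.List.pyRange (g + 1) (g + ((k + 1 : Nat) : Int) + 2) 1
          = (g + 1) :: PySem.List.pyRange (g + 1 + 1) (g + 1 + (k : Int) + 2) 1 := by
        rw [PySem.List.pyRange_one_cons (by push_cast; omega)]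
        congr 1
        push_cast
        ring
      rw [hrange]
      simp

-- the loop from a run boundary computes B's flatMap over the remaining runs
theorem bnd_lemma (s : List Int) : ∀ (d i : Nat), s.length - i ≤ d → i ≤ s.length →
    (i = 0 ∨ s[i - 1]? ≠ s[i]?) →
    aLoop s i 0 = (gsGroups (s.drop i)).flatMap gsRun := by
  intro d
  induction d with
  | zero =>
      intro i hd hle _
      have : i = s.length := by omega
      subst this
      rw [aLoop_end]
      simp [gsGroups]
  | succ d ih =>
      intro i hd hle hb
      by_cases hin : i < s.length
      · set x := s[i] with hx
        have hsome : s[i]? = some x := List.getElem?_eq_getElem hin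
        set t := s.drop (i + 1) with ht
        have hdropi : s.drop i = x :: t := List.drop_eq_getElem_cons hin
        set k := (t.takeWhile (· == x)).length with hk
        have htj : ∀ j, j < k → s[i + 1 + j]? = some x := by
          intro j hj
          have := tw_get x t j hj
          rwa [ht, List.getElem?_drop] at this
        have htend : s[i + 1 + k]? ≠ some x := by
          have := tw_end x t
          rwa [ht, List.getElem?_drop] at this
        have hlp : (decide (1 ≤ i) && (s[i - 1]? == s[i]?)) = false := by
          rcases hb with h0 | hne
          · subst h0; simp
          · have : (s[i - 1]? == s[i]?) = false := beq_eq_false_iff_ne.mpr hne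
            simp [this]
        have hgroups : gsGroups (s.drop i)
            = (x :: t.takeWhile (· == x)) :: gsGroups (t.dropWhile (· == x)) := by
          rw [hdropi, gsGroups]
        have hdw : t.dropWhile (· == x) = s.drop (i + 1 + k) := by
          rw [dw_eq_drop, ← hk, ht, List.drop_drop]
        by_cases hk0 : k = 0
        · -- singleton run
          have hne1 : s[i]? ≠ s[i + 1]? := by
            rw [hsome]
            intro hcon
            apply htend
            rw [show i + 1 + k = i + 1 by omega]
            exact hcon.symm
          have hln : (decide (i + 1 < s.length) && (s[i]? == s[i + 1]?)) = false := by
            have : (s[i]? == s[i + 1]?) = false := beq_eq_false_iff_ne.mpr hne1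
            simp [this]
          rw [aLoop_step s i 0 hin, gsStep_eval s i 0 false false hlp hln]
          simp only [Bool.and_true, Bool.and_false, Bool.false_and, Bool.true_and, Bool.and_self, Bool.not_true, Bool.not_false, Bool.true_or, Bool.false_or, Bool.or_self, Bool.false_eq_true, if_true, if_false]
          have hbnext : i + 1 = 0 ∨ s[i + 1 - 1]? ≠ s[i + 1]? := by
            right
            simpa using hne1
          rw [ih (i + 1) (by omega) (by omega) hbnext]
          have htw0 : t.takeWhile (· == x) = [] :=
            List.length_eq_zero_iff.mp (by rw [← hk]; exact hk0)
          rw [hgroups, htw0, List.flatMap_cons]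
          have : gsRun [x] = [0] := by simp [gsRun]
          rw [this, hdw, hk0]
        · -- run of length k + 1 ≥ 2
          have hk1 : 1 ≤ k := Nat.one_le_iff_ne_zero.mpr hk0
          have hnext : s[i + 1]? = some x := by
            have := htj 0 (by omega)
            simpa using this
          have hin1 : i + 1 < s.length := by
            by_contra hcon
            have : s[i + 1]? = none := List.getElem?_eq_none (by omega)
            rw [this] at hnext
            simp at hnext
          have hln : (decide (i + 1 < s.length) && (s[i]? == s[i + 1]?)) = true := by
            rw [hsome, hnext]
            simp [hin1]
          rw [aLoop_step s i 0 hin, gsStep_eval s i 0 false true hlp hln]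
          simp only [Bool.and_true, Bool.and_false, Bool.false_and, Bool.true_and, Bool.and_self, Bool.not_true, Bool.not_false, Bool.true_or, Bool.false_or, Bool.or_self, Bool.false_eq_true, if_true, if_false]
          have hrun := run_lemma s (k - 1) (i + 1) (0 + 1) hin1 (by omega)
            (by simp only [Nat.add_sub_cancel]; rw [hsome, hnext])
            (by
              intro j hj
              rw [hnext]
              exact htj j (by omega))
            (by
              rw [show i + 1 + (k - 1) = i + 1 + (k - 1) from rfl]
              have e1 : s[i + 1 + (k - 1)]? = some x := htj (k - 1) (by omega)
              have e2 : s[i + 1 + (k - 1) + 1]? ≠ some x := by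
                rw [show i + 1 + (k - 1) + 1 = i + 1 + k by omega]
                exact htend
              rw [e1]
              exact fun hcon => e2 hcon.symm)
          rw [hrun]
          have hbnext : i + 1 + (k - 1) + 1 = 0 ∨ s[i + 1 + (k - 1) + 1 - 1]? ≠ s[i + 1 + (k - 1) + 1]? := by
            right
            rw [show i + 1 + (k - 1) + 1 - 1 = i + 1 + (k - 1) by omega]
            rw [htj (k - 1) (by omega)]
            rw [show i + 1 + (k - 1) + 1 = i + 1 + k by omega]
            exact fun hcon => htend hcon.symm
          have hklen : i + k < s.length := by
            have hs := htj (k - 1) (by omega)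
            have := (List.getElem?_eq_some_iff.mp hs).1
            omega
          rw [ih (i + 1 + (k - 1) + 1) (by omega) (by omega) hbnext]
          rw [hgroups, List.flatMap_cons]
          have hlen : ((x :: t.takeWhile (· == x)).length : Int) = (k : Int) + 1 := by
            simp only [List.length_cons, ← hk]
            push_cast
            ring
          have hrungrp : gsRun (x :: t.takeWhile (· == x))
              = PySem.List.pyRange 1 ((k : Int) + 2) 1 := by
            simp only [gsRun, hlen]
            have : ((k : Int) + 1 == 1) = false := by
              apply beq_eq_false_iff_ne.mpr
              have : (1 : Int) ≤ (k : Int) := by exact_mod_cast Nat.one_le_iff_ne_zero.mpr hk0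
              omega
            rw [this]
            simp only [Bool.false_eq_true, if_false]
            have harith : (k : Int) + 1 + 1 = (k : Int) + 2 := by ring
            rw [harith]
          rw [hrungrp, hdw]
          have hidx : i + 1 + (k - 1) + 1 = i + 1 + k := by omega
          rw [hidx]
          have hsplit : PySem.List.pyRange 1 ((k : Int) + 2) 1
              = 1 :: PySem.List.pyRange 2 ((k : Int) + 2) 1 := by
            have := PySem.List.pyRange_one_cons (a := (1 : Int)) (b := (k : Int) + 2) (by omega)
            rw [this]
            norm_num
          rw [hsplit]
          have hcast2 : ((k - 1 : Nat) : Int) = (k : Int) - 1 := by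
            have : 1 ≤ k := Nat.one_le_iff_ne_zero.mpr hk0
            omega
          rw [hcast2] at hrun ⊢
          simp
      · have : i = s.length := by omega
        subst this
        rw [aLoop_end]
        simp [gsGroups]

-- ===== VERDICT (by name: the statement is the Claim_ definition above) =====
theorem groupSequence_spec : Claim_equal_groupSequence := by
  intro seq _
  unfold Spec_groupSequence
  have hA : groupSequence seq = aLoop seq 0 0 := by
    unfold groupSequence aLoop
    norm_num
  rw [hA, bnd_lemma seq seq.length 0 (by omega) (by omega) (Or.inl rfl)]
  rw [alt_eq_flatMap]
  simp
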